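-- pv_equiv track=rewrite | github.com/nyimbi/Flask-AppBuilder | tmp/mixins/automated-reasoner.py | _format_text_explanation
-- ===== SOURCE A (Python) =====
-- from typing import List, Dict, Set, Optional, Any, Tuple, Callable, Type
--
-- def _format_text_explanation(
--     results: Dict[str, Any], explanation: str
-- ) -> str:
--     """Format text explanation with proper spacing and sections."""
--     formatted = []
--     for line in explanation.split("\n"):
--         if line.startswith("#"):
--             formatted.append(f"\n{line.lstrip('#').strip()}")
--         else:
--             formatted.append(line)
--     return "\n".join(formatted)
-- ===== SOURCE B (Python) =====
-- def _format_text_explanation(results, explanation):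
--     """Single left-to-right character scan: rewrite each header line in place,
--     copying every other character through; no line list is built."""
--     out = []
--     i = 0
--     n = len(explanation)
--     while i < n:
--         if (i == 0 or explanation[i - 1] == "\n") and explanation[i] == "#":
--             j = i
--             while j < n and explanation[j] != "\n":
--                 j += 1
--             out.append("\n" + explanation[i:j].lstrip("#").strip())
--             i = j
--         else:
--             out.append(explanation[i])
--             i += 1
--     return "".join(out)
-- ===== Notes on version B (the rewrite author's own statement) =====
-- stated objective: alternative
-- what changed: A splits the text into a list of lines, transforms each and re-joins with '\n'; B performs one left-to-right character scan that rewrites a header line in place when it sees '#' at a line start and copies every other character through, building no line list.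
import Mathlib
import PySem

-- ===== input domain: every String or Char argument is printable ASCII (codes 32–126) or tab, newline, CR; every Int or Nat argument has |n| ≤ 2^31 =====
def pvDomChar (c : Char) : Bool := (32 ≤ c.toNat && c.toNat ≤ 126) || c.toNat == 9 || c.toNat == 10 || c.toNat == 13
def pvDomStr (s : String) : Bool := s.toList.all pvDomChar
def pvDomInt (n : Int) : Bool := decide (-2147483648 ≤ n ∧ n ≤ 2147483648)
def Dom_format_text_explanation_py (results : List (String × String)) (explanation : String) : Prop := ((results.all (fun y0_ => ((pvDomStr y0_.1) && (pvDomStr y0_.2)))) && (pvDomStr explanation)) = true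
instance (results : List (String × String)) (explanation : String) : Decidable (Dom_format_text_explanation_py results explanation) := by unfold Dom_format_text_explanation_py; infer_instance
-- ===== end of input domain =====

-- B replaces A's split-into-lines / transform / re-join pipeline by a single in-place
-- character scan that rewrites header lines where it meets them (objective: alternative).

-- ===== PORT A =====
-- one line of A's loop body: f"\n{line.lstrip('#').strip()}" if it starts with '#', else the line
-- (lstrip('#') is ported by hand as dropWhile (· == '#'): exact, Python drops exactly the leading '#' characters)
def fteLineA (line : List Char) : List Char :=
  if PySem.Chars.startswith line ['#'] then
    '\n' :: PySem.Chars.strip (line.dropWhile (fun c => c == '#'))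
  else line

-- A: formatted = [f(line) for line in explanation.split("\n")]; return "\n".join(formatted)
def format_text_explanation_py (results : List (String × String)) (explanation : String) : String :=
  String.mk (PySem.Chars.join ['\n'] ((PySem.Chars.splitOn explanation.toList ['\n']).map fteLineA))

-- ===== PORT B =====
-- B's while loop: atStart ↔ (i == 0 or explanation[i-1] == "\n"); at a '#' at line start the whole
-- line (c :: takeWhile (≠ '\n')) is rewritten and the scan resumes at the line's end, else one char is copied
def fteScan (atStart : Bool) (cs : List Char) : List Char :=
  match cs with
  | [] => []
  | c :: rest =>
    if atStart && (c == '#') then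
      '\n' :: (PySem.Chars.strip ((c :: rest.takeWhile (fun d => !(d == '\n'))).dropWhile (fun d => d == '#')))
        ++ fteScan false (rest.dropWhile (fun d => !(d == '\n')))
    else
      c :: fteScan (c == '\n') rest
termination_by cs.length
decreasing_by
  · exact Nat.lt_succ_of_le (List.length_dropWhile_le _ rest)
  · exact Nat.lt_succ_self _

def format_text_explanation_py_alt (results : List (String × String)) (explanation : String) : String :=
  String.mk (fteScan true explanation.toList)

-- ===== PRECONDITION & SPEC =====
def Spec_format_text_explanation_py (results : List (String × String)) (explanation : String) (out : String) : Prop := out = format_text_explanation_py_alt results explanation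
instance (results : List (String × String)) (explanation : String) (out : String) : Decidable (Spec_format_text_explanation_py results explanation out) := by unfold Spec_format_text_explanation_py; infer_instance

-- ===== CLAIM (what is proved, stated in full; the proofs are below) =====
def Claim_equal_format_text_explanation_py : Prop := ∀ (results : List (String × String)) (explanation : String), Dom_format_text_explanation_py results explanation → Spec_format_text_explanation_py results explanation (format_text_explanation_py results explanation)

-- ===== LEMMAS AND PROOFS =====

-- reference line splitter: split on '\n', keeping empty pieces (Python's s.split("\n"))
def mySplit : List Char → List (List Char)
  | [] => [[]]
  | c :: cs => if c = '\n' then [] :: mySplit cs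
               else (c :: (mySplit cs).headI) :: (mySplit cs).tail

theorem mySplit_ne_nil (cs : List Char) : mySplit cs ≠ [] := by
  cases cs with
  | nil => simp [mySplit]
  | cons c cs => by_cases h : c = '\n' <;> simp [mySplit, h]

theorem mySplit_head_tail (cs : List Char) :
    mySplit cs = (mySplit cs).headI :: (mySplit cs).tail := by
  cases h : mySplit cs with
  | nil => exact absurd h (mySplit_ne_nil cs)
  | cons a t => simp

theorem mySplit_head (cs : List Char) :
    (mySplit cs).headI = cs.takeWhile (fun d => !(d == '\n')) := by
  induction cs with
  | nil => simp [mySplit]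
  | cons c cs ih =>
    by_cases h : c = '\n' <;> simp [mySplit, h, ih]

theorem mySplit_tail (cs : List Char) :
    (cs.dropWhile (fun d => !(d == '\n')) = [] ∧ (mySplit cs).tail = []) ∨
    (∃ ds, cs.dropWhile (fun d => !(d == '\n')) = '\n' :: ds ∧ (mySplit cs).tail = mySplit ds) := by
  induction cs with
  | nil => left; simp [mySplit]
  | cons c cs ih =>
    by_cases h : c = '\n'
    · right; exact ⟨cs, by simp [mySplit, h]⟩
    · rcases ih with ⟨h1, h2⟩ | ⟨ds, h1, h2⟩
      · left; simp [mySplit, h, h1, h2]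
      · right; exact ⟨ds, by simp [mySplit, h, h1, h2]⟩

-- the fuel loop behind PySem.Chars.splitOn, characterized against mySplit
theorem splitOn_go_inv (fuel : Nat) (l cur : List Char) (acc : List (List Char))
    (hf : l.length < fuel) :
    PySem.Chars.splitOn.go ['\n'] fuel l cur acc
      = acc.reverse ++ (cur.reverse ++ (mySplit l).headI) :: (mySplit l).tail := by
  induction fuel generalizing l cur acc with
  | zero => omega
  | succ fuel ih =>
    cases l with
    | nil =>
      rw [PySem.Chars.splitOn.go.eq_def]
      simp [mySplit]
    | cons c rest =>
      rw [PySem.Chars.splitOn.go.eq_def]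
      by_cases h : c = '\n'
      · have hpre : List.isPrefixOf ['\n'] (c :: rest) = true := by simp [h, List.isPrefixOf]
        simp only [hpre, if_true]
        have hdrop : List.drop (['\n'] : List Char).length (c :: rest) = rest := rfl
        rw [hdrop, ih rest [] (cur.reverse :: acc) (by simpa using Nat.lt_of_succ_lt_succ hf)]
        simp [mySplit, h, ← mySplit_head_tail rest]
      · have hpre : List.isPrefixOf ['\n'] (c :: rest) = false := by
          simp [List.isPrefixOf]; exact fun hc => h hc.symm
        simp only [hpre, Bool.false_eq_true, if_false]
        rw [ih rest (c :: cur) acc (by simpa using Nat.lt_of_succ_lt_succ hf)]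
        simp [mySplit, h]

theorem splitOn_eq_mySplit (cs : List Char) :
    PySem.Chars.splitOn cs ['\n'] = mySplit cs := by
  unfold PySem.Chars.splitOn
  rw [splitOn_go_inv (cs.length + 1) cs [] [] (Nat.lt_succ_self _)]
  simp [← mySplit_head_tail cs]

-- "\n".join of the transformed lines, written as structural recursion on the line list
def joinFmt : List (List Char) → List Char
  | [] => []
  | [l] => fteLineA l
  | l :: l' :: ls => fteLineA l ++ '\n' :: joinFmt (l' :: ls)

-- same, but the first line kept raw (the state of B's scan in the middle of a line)
def joinRaw : List (List Char) → List Char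
  | [] => []
  | [l] => l
  | l :: l' :: ls => l ++ '\n' :: joinFmt (l' :: ls)

theorem intercalate_eq_joinFmt (ls : List (List Char)) :
    PySem.Chars.join ['\n'] (ls.map fteLineA) = joinFmt ls := by
  induction ls with
  | nil => simp [PySem.Chars.join, List.intercalate, joinFmt]
  | cons l ls ih =>
    cases ls with
    | nil => simp [PySem.Chars.join, List.intercalate, joinFmt]
    | cons l' ls' =>
      simp only [List.map_cons] at ih ⊢
      have : (['\n'] : List Char).intercalate (fteLineA l :: fteLineA l' :: ls'.map fteLineA)
          = fteLineA l ++ ['\n'] ++ (['\n'] : List Char).intercalate (fteLineA l' :: ls'.map fteLineA) := by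
        simp [List.intercalate, List.intersperse]
      simp only [PySem.Chars.join] at ih ⊢
      rw [this, ih]
      simp [joinFmt]

-- the main invariant: B's scan computes A's join of transformed (resp. raw-first) lines
theorem fteScan_eq_join (n : Nat) : ∀ cs : List Char, cs.length ≤ n →
    fteScan true cs = joinFmt (mySplit cs) ∧ fteScan false cs = joinRaw (mySplit cs) := by
  induction n with
  | zero =>
    intro cs h
    have : cs = [] := List.eq_nil_of_length_eq_zero (Nat.le_zero.mp h)
    subst this
    constructor <;> simp [fteScan, mySplit, joinFmt, joinRaw, fteLineA, PySem.Chars.startswith]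
  | succ n ih =>
    intro cs hlen
    cases cs with
    | nil =>
      constructor <;> simp [fteScan, mySplit, joinFmt, joinRaw, fteLineA, PySem.Chars.startswith]
    | cons c rest =>
      have hrest : rest.length ≤ n := by simpa using Nat.le_of_succ_le_succ hlen
      constructor
      · -- atStart = true
        by_cases hc : c = '#'
        · -- header line
          rw [fteScan]
          simp only [hc, Bool.true_and, beq_self_eq_true, if_true]
          have hsp : mySplit ('#' :: rest)
              = ('#' :: (mySplit rest).headI) :: (mySplit rest).tail := by
            simp [mySplit]
          have hhead := mySplit_head rest
          rcases mySplit_tail rest with ⟨hd, ht⟩ | ⟨ds, hd, ht⟩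
          · -- no '\n' after the header: single line
            rw [hd, fteScan]
            rw [hsp, ht, joinFmt]
            simp [fteLineA, PySem.Chars.startswith, List.isPrefixOf, hhead]
          · -- a '\n' follows: scan resumes on it with atStart = false, copies it, goes on
            have hds : ds.length ≤ n := by
              have h1 : ('\n' :: ds).length ≤ rest.length := by
                rw [← hd]; exact List.length_dropWhile_le _ rest
              simp at h1; omega
            rw [hd, fteScan]
            simp only [Bool.false_and, Bool.false_eq_true, if_false, beq_self_eq_true]
            rw [(ih ds hds).1]
            rw [hsp, ht, mySplit_head_tail ds, joinFmt, ← mySplit_head_tail ds]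
            simp [fteLineA, PySem.Chars.startswith, List.isPrefixOf, hhead]
        · by_cases hnl : c = '\n'
          · -- empty header-less first line, '\n' copied
            rw [fteScan]
            simp only [hnl]
            have : ('\n' == '#') = false := by decide
            simp only [this, Bool.and_false, Bool.false_eq_true, if_false, beq_self_eq_true]
            rw [(ih rest hrest).1]
            rw [show mySplit ('\n' :: rest) = [] :: mySplit rest by simp [mySplit]]
            rw [mySplit_head_tail rest, joinFmt, ← mySplit_head_tail rest]
            simp [fteLineA, PySem.Chars.startswith, List.isPrefixOf]
          · -- ordinary character: the whole first line passes through unchanged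
            rw [fteScan]
            have h1 : (c == '#') = false := by simpa using hc
            have h2 : (c == '\n') = false := by simpa using hnl
            simp only [h1, Bool.and_false, Bool.false_eq_true, if_false, h2]
            rw [(ih rest hrest).2]
            rw [show mySplit (c :: rest)
                  = (c :: (mySplit rest).headI) :: (mySplit rest).tail by simp [mySplit, hnl]]
            have hA : fteLineA (c :: (mySplit rest).headI) = c :: (mySplit rest).headI := by
              simp [fteLineA, PySem.Chars.startswith, List.isPrefixOf, h1]
              intro hq; exact absurd hq.symm hc
            cases htl : (mySplit rest).tail with
            | nil =>
              rw [joinFmt, hA, mySplit_head_tail rest, htl, joinRaw]; simp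
            | cons t ts =>
              rw [joinFmt, hA, mySplit_head_tail rest, htl, joinRaw]; simp
      · -- atStart = false: first character is copied whatever it is
        rw [fteScan]
        simp only [Bool.false_and, Bool.false_eq_true, if_false]
        by_cases hnl : c = '\n'
        · simp only [hnl, beq_self_eq_true]
          rw [(ih rest hrest).1]
          rw [show mySplit ('\n' :: rest) = [] :: mySplit rest by simp [mySplit]]
          rw [mySplit_head_tail rest, joinRaw, ← mySplit_head_tail rest]; simp
        · have h2 : (c == '\n') = false := by simpa using hnl
          simp only [h2]
          rw [(ih rest hrest).2]
          rw [show mySplit (c :: rest)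
                = (c :: (mySplit rest).headI) :: (mySplit rest).tail by simp [mySplit, hnl]]
          cases htl : (mySplit rest).tail with
          | nil => rw [joinRaw, mySplit_head_tail rest, htl, joinRaw]; simp
          | cons t ts =>
            rw [joinRaw, mySplit_head_tail rest, htl, joinRaw]
            simp

-- ===== VERDICT (by name: the statement is the Claim_ definition above) =====
theorem format_text_explanation_py_spec : Claim_equal_format_text_explanation_py := by
  intro results explanation _hdom
  unfold Spec_format_text_explanation_py format_text_explanation_py format_text_explanation_py_alt
  rw [splitOn_eq_mySplit, intercalate_eq_joinFmt,
    ← (fteScan_eq_join explanation.toList.length explanation.toList (Nat.le_refl _)).1]
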